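-- pv_equiv track=rewrite | github.com/moranmiz/Cooking-Up-Creativity | cooking_up_creativity/src/generate_ideas/tree_edit_distance.py | handle_same_labels
-- ===== SOURCE A (Python) =====
-- def handle_same_labels(tree_dict: dict) -> dict:
--     """
--     Handles same labels in the tree by appending a unique suffix to each duplicate label.
--
--     :param tree_dict: the tree dictionary
--     :return: the modified tree dictionary with unique labels
--     """
--
--     labels_to_node_names = {}
--     for node_name in tree_dict:
--         label = tree_dict[node_name]['label']
--         if label not in labels_to_node_names:
--             labels_to_node_names[label] = []
--         labels_to_node_names[label] += [node_name]
--
--     for label in labels_to_node_names: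
--         if len(labels_to_node_names[label]) > 1:
--             node_names = labels_to_node_names[label]
--             for i in range(len(node_names)):
--                 tree_dict[node_names[i]]['label'] = tree_dict[node_names[i]]['label'] + str(i+1)
--
--     return tree_dict
-- ===== SOURCE B (Python) =====
-- def handle_same_labels(tree_dict: dict) -> dict:
--     """Single pass with running per-label indices instead of grouping node names by label."""
--     counts = {}
--     for node in tree_dict.values():
--         label = node['label']
--         counts[label] = counts.get(label, 0) + 1
--     seen = {}
--     for node in tree_dict.values():
--         label = node['label']
--         seen[label] = seen.get(label, 0) + 1
--         if counts[label] > 1: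
--             node['label'] = label + str(seen[label])
--     return tree_dict
-- ===== Notes on version B (the rewrite author's own statement) =====
-- stated objective: simpler
-- what changed: A groups node names by label into lists and then runs a second indexed loop over each duplicate group to rewrite labels; B makes one pass with a count-per-label table and a running index per label, renaming each node as it is visited, with no grouping structure and no inner index loop. Pre_ requires every node to carry a 'label' key (A raises KeyError otherwise) and excludes association lists with duplicate outer node names or duplicate inner keys, which a Python dict cannot represent (the duplicates are collapsed before the call).
import Mathlib
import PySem

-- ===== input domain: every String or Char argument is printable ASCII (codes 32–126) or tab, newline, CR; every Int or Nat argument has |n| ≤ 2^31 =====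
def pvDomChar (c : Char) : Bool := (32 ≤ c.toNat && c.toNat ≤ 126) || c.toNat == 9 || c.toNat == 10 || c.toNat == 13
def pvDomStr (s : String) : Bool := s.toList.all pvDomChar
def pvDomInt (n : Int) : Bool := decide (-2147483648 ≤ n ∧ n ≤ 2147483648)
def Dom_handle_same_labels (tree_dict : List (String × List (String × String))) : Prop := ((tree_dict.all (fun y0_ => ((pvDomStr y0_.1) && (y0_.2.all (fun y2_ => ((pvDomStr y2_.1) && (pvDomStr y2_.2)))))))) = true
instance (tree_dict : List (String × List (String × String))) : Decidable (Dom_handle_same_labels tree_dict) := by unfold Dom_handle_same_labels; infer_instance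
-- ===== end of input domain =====

-- B replaces A's label→node-name grouping pass (and its indexed inner loop over each duplicate
-- group) with a single pass keeping a running per-label index; both mutate the tree in place in
-- Python — the equivalence proved here is about the returned value. Pre_ requires every node to
-- carry a 'label' key (A raises KeyError otherwise) and excludes association lists with duplicate
-- outer node names or duplicate inner keys, which a Python dict argument cannot represent.


-- ===== PORT A =====
-- tree_dict[n]['label'] (the key is present on every admitted input; getD's default is never used there)
def pvLabel (v : List (String × String)) : String := (PySem.Dict.mk v).getD "label" ""


def handle_same_labels (tree_dict : List (String × List (String × String))) : List (String × List (String × String)) :=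
  let td : PySem.Dict String (List (String × String)) := PySem.Dict.mk tree_dict
  let labels_to_node_names : PySem.Dict String (List String) :=
    td.keys.foldl (fun d node_name =>
      d.modify (pvLabel (td.getD node_name [])) [] (fun l => l ++ [node_name])) PySem.Dict.empty
  let td2 : PySem.Dict String (List (String × String)) :=
    labels_to_node_names.keys.foldl (fun t label =>
      let node_names := labels_to_node_names.getD label []
      if 1 < node_names.length then
        (PySem.List.pyRange 0 (node_names.length : Int) 1).foldl (fun t i =>
          t.modify (PySem.List.pyGetD node_names i "") []
            (fun inner => ((PySem.Dict.mk inner).insert "label"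
                (pvLabel inner ++ PySem.Int.toStr (i + 1))).items)) t
      else t) td
  td2.items

-- ===== PORT B =====
def handle_same_labels_alt (tree_dict : List (String × List (String × String))) : List (String × List (String × String)) :=
  let counts : PySem.Dict String Int :=
    tree_dict.foldl (fun d p => d.insert (pvLabel p.2) (d.getD (pvLabel p.2) 0 + 1)) PySem.Dict.empty
  (tree_dict.foldl (fun (st : PySem.Dict String Int × List (String × List (String × String))) p =>
      let label := pvLabel p.2
      let seen := st.1.insert label (st.1.getD label 0 + 1)
      let node := if 1 < counts.getD label 0 then
          ((PySem.Dict.mk p.2).insert "label" (label ++ PySem.Int.toStr (seen.getD label 0))).items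
        else p.2
      (seen, st.2 ++ [(p.1, node)])) (PySem.Dict.empty, ([] : List (String × List (String × String))))).2

-- ===== PRECONDITION & SPEC =====
-- Pre_ excludes (a) nodes without a 'label' key, on which A raises KeyError, and (b) association
-- lists with duplicate outer node names or duplicate inner keys, which the Python dict argument
-- cannot represent (duplicates are collapsed before A ever runs).
def Pre_handle_same_labels (tree_dict : List (String × List (String × String))) : Prop :=
  (tree_dict.map Prod.fst).Nodup ∧
    ∀ p ∈ tree_dict, (p.2.map Prod.fst).Nodup ∧ "label" ∈ p.2.map Prod.fst
instance (tree_dict : List (String × List (String × String))) : Decidable (Pre_handle_same_labels tree_dict) := by unfold Pre_handle_same_labels; infer_instance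

def pvWitness_handle_same_labels : (List (String × List (String × String))) :=
  [("n1", [("label", "x")]), ("n2", [("label", "x")]), ("n3", [("label", "y")])]

def Spec_handle_same_labels (tree_dict : List (String × List (String × String))) (out : List (String × List (String × String))) : Prop := out = handle_same_labels_alt tree_dict
instance (tree_dict : List (String × List (String × String))) (out : List (String × List (String × String))) : Decidable (Spec_handle_same_labels tree_dict out) := by unfold Spec_handle_same_labels; infer_instance

-- ===== CLAIM (what is proved, stated in full; the proofs are below) =====
def Claim_equal_handle_same_labels : Prop := ∀ (tree_dict : List (String × List (String × String))), Dom_handle_same_labels tree_dict → Pre_handle_same_labels tree_dict → Spec_handle_same_labels tree_dict (handle_same_labels tree_dict)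

-- ===== LEMMAS AND PROOFS =====

def pvF (i : Int) (inner : List (String × String)) : List (String × String) :=
  ((PySem.Dict.mk inner).insert "label" (pvLabel inner ++ PySem.Int.toStr (i + 1))).items

lemma pv_inner_ne :
    ∀ (g : List String) (s : Int) (t : PySem.Dict String (List (String × String))) (n : String),
      n ∉ g →
      ((PySem.List.enumerate g s).foldl (fun t q => t.modify q.2 [] (pvF q.1)) t).getD n []
        = t.getD n [] := by
  intro g
  induction g with
  | nil => intro s t n _; simp [PySem.List.enumerate_nil]
  | cons h r ih =>
    intro s t n hn
    rw [PySem.List.enumerate_cons, List.foldl_cons, ih _ _ _ (by simp_all)]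
    exact PySem.Dict.getD_modify_of_ne _ _ _ (by simp_all)

lemma pv_inner_mem :
    ∀ (g : List String) (s : Int) (t : PySem.Dict String (List (String × String))) (n : String),
      g.Nodup → n ∈ g →
      ((PySem.List.enumerate g s).foldl (fun t q => t.modify q.2 [] (pvF q.1)) t).getD n []
        = pvF (s + (g.idxOf n : Int)) (t.getD n []) := by
  intro g
  induction g with
  | nil => intro s t n _ hm; simp at hm
  | cons h r ih =>
    intro s t n hnd hm
    rw [PySem.List.enumerate_cons, List.foldl_cons]
    by_cases he : n = h
    · subst he
      rw [pv_inner_ne _ _ _ _ (by simp_all), List.idxOf_cons_self]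
      rw [PySem.Dict.getD_modify_self]
      norm_num
    · rw [ih _ _ _ hnd.of_cons (by simp_all), PySem.Dict.getD_modify_of_ne _ _ _ he]
      have : (h :: r).idxOf n = r.idxOf n + 1 := by
        simp [Ne.symm he]
      rw [this]
      congr 1
      push_cast
      ring

lemma pv_inner_keys :
    ∀ (g : List String) (s : Int) (t : PySem.Dict String (List (String × String))),
      (∀ m ∈ g, m ∈ t.keys) →
      ((PySem.List.enumerate g s).foldl (fun t q => t.modify q.2 [] (pvF q.1)) t).keys = t.keys := by
  intro g
  induction g with
  | nil => intro s t _; simp [PySem.List.enumerate_nil]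
  | cons h r ih =>
    intro s t hk
    rw [PySem.List.enumerate_cons, List.foldl_cons]
    have hkeys : (t.modify h [] (pvF s)).keys = t.keys := by
      rw [PySem.Dict.keys_modify, PySem.Dict.keys_insert_of_contains]
      exact (PySem.Dict.contains_iff_mem_keys _ _).2 (hk h (by simp))
    rw [ih _ _ (by rw [hkeys]; intro m hm; exact hk m (by simp [hm]))]
    exact hkeys

lemma pv_range_to_enum (g : List String) (t : PySem.Dict String (List (String × String))) :
    (PySem.List.pyRange 0 (g.length : Int) 1).foldl (fun t i =>
        t.modify (PySem.List.pyGetD g i "") []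
          (fun inner => ((PySem.Dict.mk inner).insert "label"
              (pvLabel inner ++ PySem.Int.toStr (i + 1))).items)) t
      = (PySem.List.enumerate g 0).foldl (fun t q => t.modify q.2 [] (pvF q.1)) t := by
  rw [PySem.List.enumerate_eq_map_pyRange g "", List.foldl_map]
  rfl

def pvOuterStep (gfun : String → List String) (t : PySem.Dict String (List (String × String))) (c : String) :
    PySem.Dict String (List (String × String)) :=
  if 1 < (gfun c).length then
    (PySem.List.pyRange 0 ((gfun c).length : Int) 1).foldl (fun t i =>
      t.modify (PySem.List.pyGetD (gfun c) i "") []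
        (fun inner => ((PySem.Dict.mk inner).insert "label"
            (pvLabel inner ++ PySem.Int.toStr (i + 1))).items)) t
  else t

lemma pv_outer_ne (gfun : String → List String) :
    ∀ (cs : List String) (t : PySem.Dict String (List (String × String))) (n : String),
      (∀ c ∈ cs, n ∉ gfun c) →
      (cs.foldl (pvOuterStep gfun) t).getD n [] = t.getD n [] := by
  intro cs
  induction cs with
  | nil => intro t n _; rfl
  | cons c r ih =>
    intro t n hn
    rw [List.foldl_cons, ih _ _ (by intro c' hc'; exact hn c' (by simp [hc'])) ]
    unfold pvOuterStep
    split
    · rw [pv_range_to_enum, pv_inner_ne _ _ _ _ (hn c (by simp))]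
    · rfl

lemma pv_outer_keys (gfun : String → List String) :
    ∀ (cs : List String) (t : PySem.Dict String (List (String × String))),
      (∀ c ∈ cs, ∀ m ∈ gfun c, m ∈ t.keys) →
      (cs.foldl (pvOuterStep gfun) t).keys = t.keys := by
  intro cs
  induction cs with
  | nil => intro t _; rfl
  | cons c r ih =>
    intro t hk
    have h1 : (pvOuterStep gfun t c).keys = t.keys := by
      unfold pvOuterStep
      split
      · rw [pv_range_to_enum, pv_inner_keys _ _ _ (hk c (by simp))]
      · rfl
    rw [List.foldl_cons, ih _ (by rw [h1]; intro c' hc' m hm; exact hk c' (by simp [hc']) m hm), h1]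

lemma pv_outer_main (gfun : String → List String) (ℓ n : String)
    (hng : ∀ c, n ∈ gfun c → c = ℓ) (hgnd : (gfun ℓ).Nodup) (hmem : n ∈ gfun ℓ) :
    ∀ (cs : List String) (t : PySem.Dict String (List (String × String))), cs.Nodup →
      (cs.foldl (pvOuterStep gfun) t).getD n []
        = if ℓ ∈ cs ∧ 1 < (gfun ℓ).length then pvF ((gfun ℓ).idxOf n : Int) (t.getD n [])
          else t.getD n [] := by
  intro cs
  induction cs with
  | nil => intro t _; simp
  | cons c r ih =>
    intro t hnd
    rw [List.foldl_cons]
    by_cases hc : c = ℓ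
    · subst hc
      have hcr : c ∉ r := (List.nodup_cons.1 hnd).1
      have hrest : ∀ c' ∈ r, n ∉ gfun c' := by
        intro c' hc' hn'
        exact hcr ((hng c' hn') ▸ hc')
      rw [pv_outer_ne _ _ _ _ hrest]
      unfold pvOuterStep
      split
      · next hlen =>
        rw [pv_range_to_enum, pv_inner_mem _ _ _ _ hgnd hmem]
        simp [hlen]
      · next hlen =>
        simp [hlen]
    · have hnc : n ∉ gfun c := fun hn' => hc (hng c hn')
      have h1 : (pvOuterStep gfun t c).getD n [] = t.getD n [] := by
        unfold pvOuterStep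
        split
        · rw [pv_range_to_enum, pv_inner_ne _ _ _ _ hnc]
        · rfl
      rw [ih _ (List.nodup_cons.1 hnd).2, h1]
      have : (ℓ ∈ c :: r) ↔ (ℓ ∈ r) := by simp [Ne.symm hc]
      simp only [this]

def pvRow (Lt prior : List String) (p : String × List (String × String)) : String × List (String × String) :=
  (p.1, if 1 < Lt.count (pvLabel p.2) then
      ((PySem.Dict.mk p.2).insert "label"
        (pvLabel p.2 ++ PySem.Int.toStr ((prior.count (pvLabel p.2) : Int) + 1))).items
    else p.2)

def pvMap (Lt prior : List String) : List (String × List (String × String)) → List (String × List (String × String))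
  | [] => []
  | p :: r => pvRow Lt prior p :: pvMap Lt (prior ++ [pvLabel p.2]) r

lemma pvB_loop (cd : PySem.Dict String Int) (Lt : List String)
    (hcd : ∀ l, cd.getD l 0 = (Lt.count l : Int)) :
    ∀ (r : List (String × List (String × String))) (seen : PySem.Dict String Int)
      (acc : List (String × List (String × String))) (P : List String),
      (∀ l, seen.getD l 0 = (P.count l : Int)) →
      (r.foldl (fun (st : PySem.Dict String Int × List (String × List (String × String))) p =>
          (st.1.insert (pvLabel p.2) (st.1.getD (pvLabel p.2) 0 + 1),
           st.2 ++ [(p.1, if 1 < cd.getD (pvLabel p.2) 0 then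
              ((PySem.Dict.mk p.2).insert "label"
                (pvLabel p.2 ++ PySem.Int.toStr ((st.1.insert (pvLabel p.2) (st.1.getD (pvLabel p.2) 0 + 1)).getD (pvLabel p.2) 0))).items
            else p.2)])) (seen, acc)).2
        = acc ++ pvMap Lt P r := by
  intro r
  induction r with
  | nil => intro seen acc P _; simp [pvMap]
  | cons p rest ih =>
    intro seen acc P hseen
    rw [List.foldl_cons]
    have hseen' : ∀ l, (seen.insert (pvLabel p.2) (seen.getD (pvLabel p.2) 0 + 1)).getD l 0
        = ((P ++ [pvLabel p.2]).count l : Int) := by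
      intro l
      rw [PySem.Dict.getD_insert, List.count_append]
      by_cases hl : l = pvLabel p.2
      · simp [hl, hseen]
      · simp [hl, hseen, Ne.symm hl]
    rw [ih _ _ _ hseen']
    rw [List.append_assoc]
    congr 1
    show [_] ++ pvMap Lt (P ++ [pvLabel p.2]) rest = pvMap Lt P (p :: rest)
    rw [pvMap]
    rw [List.singleton_append]
    congr 1
    unfold pvRow
    congr 1
    rw [hcd, PySem.Dict.getD_insert_self, hseen]
    by_cases hcount : 1 < Lt.count (pvLabel p.2)
    · rw [if_pos hcount, if_pos (by exact_mod_cast hcount : (1:Int) < (Lt.count (pvLabel p.2) : Int))]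
    · rw [if_neg hcount, if_neg (by exact_mod_cast hcount : ¬ (1:Int) < (Lt.count (pvLabel p.2) : Int))]

lemma pvB_eq (t : List (String × List (String × String))) :
    handle_same_labels_alt t = pvMap (t.map (fun p => pvLabel p.2)) [] t := by
  have hcd : ∀ l, (t.foldl (fun d p => d.insert (pvLabel p.2) (d.getD (pvLabel p.2) 0 + 1)) PySem.Dict.empty).getD l 0
      = ((t.map (fun p => pvLabel p.2)).count l : Int) := by
    intro l
    rw [show (List.foldl (fun (d : PySem.Dict String Int) p => d.insert (pvLabel p.2) (d.getD (pvLabel p.2) 0 + 1)) PySem.Dict.empty t)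
        = (t.map (fun p => pvLabel p.2)).foldl (fun d x => d.insert x (d.getD x 0 + 1)) PySem.Dict.empty
      from Eq.symm List.foldl_map,
      PySem.Dict.getD_foldl_insert_add_one]
    simp
  exact pvB_loop _ _ hcd t PySem.Dict.empty [] [] (by intro l; simp)

lemma pv_key_inj {t : List (String × List (String × String))}
    (hnd : (t.map Prod.fst).Nodup) {p p' : String × List (String × String)}
    (hp : p ∈ t) (hp' : p' ∈ t) (h : p.1 = p'.1) : p = p' :=
  List.inj_on_of_nodup_map hnd hp hp' h

lemma pvA_assemble (t : List (String × List (String × String)))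
    (hnd : (t.map Prod.fst).Nodup) :
    ∀ (suf pre : List (String × List (String × String))), pre ++ suf = t →
      suf.map (fun p =>
          (p.1, if 1 < (t.map (fun q => pvLabel q.2)).count (pvLabel p.2)
            then pvF ((((t.filter (fun q => pvLabel q.2 == pvLabel p.2)).map (fun q => q.1)).idxOf p.1 : Int)) p.2
            else p.2))
        = pvMap (t.map (fun q => pvLabel q.2)) (pre.map (fun q => pvLabel q.2)) suf := by
  intro suf
  induction suf with
  | nil => intro pre _; simp [pvMap]
  | cons p rest ih =>
    intro pre hsplit
    rw [List.map_cons, pvMap]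
    congr 1
    · -- head entry
      unfold pvRow
      by_cases hcount : 1 < (t.map (fun q => pvLabel q.2)).count (pvLabel p.2)
      · rw [if_pos hcount, if_pos hcount]
        congr 1
        unfold pvF
        congr 3
        -- idxOf p.1 in the label-group = count of the label among earlier entries
        have hfil : t.filter (fun q => pvLabel q.2 == pvLabel p.2)
            = pre.filter (fun q => pvLabel q.2 == pvLabel p.2)
              ++ p :: rest.filter (fun q => pvLabel q.2 == pvLabel p.2) := by
          rw [← hsplit, List.filter_append, List.filter_cons, if_pos (by simp)]
        have hp1 : p.1 ∉ (pre.filter (fun q => pvLabel q.2 == pvLabel p.2)).map (fun q => q.1) := by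
          intro hmem
        -- p.1 would be a key of pre, but keys of t are nodup and p.1 is the key of p ∈ suf
          obtain ⟨q, hq, hq1⟩ := List.mem_map.1 hmem
          have hqpre : q ∈ pre := List.mem_of_mem_filter hq
          have : (pre.map Prod.fst ++ (p :: rest).map Prod.fst).Nodup := by
            rw [← List.map_append, hsplit]; exact hnd
          have hdis := (List.nodup_append.1 this).2.2
          have h1 : p.1 ∈ pre.map Prod.fst := by
            rw [← hq1]; exact List.mem_map_of_mem hqpre
          exact hdis p.1 h1 p.1 (by simp) rfl
        rw [hfil, List.map_append, List.idxOf_append, if_neg hp1, List.map_cons,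
          List.idxOf_cons_self]
        have hlen : (pre.filter (fun q => pvLabel q.2 == pvLabel p.2)).length
            = (pre.map (fun q => pvLabel q.2)).count (pvLabel p.2) := by
          rw [List.count_eq_countP, List.countP_map, List.countP_eq_length_filter]
          rfl
        rw [List.length_map, hlen]
        norm_num
      · rw [if_neg hcount, if_neg hcount]
    · have := ih (pre ++ [p]) (by simpa using hsplit)
      simpa using this

def pvGfun (t : List (String × List (String × String))) (c : String) : List String :=
  (t.filter (fun q => pvLabel q.2 == c)).map (fun q => q.1)

lemma pvA_phase2 (t : List (String × List (String × String)))
    (hnd : (t.map Prod.fst).Nodup) (l2n : PySem.Dict String (List String))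
    (hgval : ∀ c, l2n.getD c [] = pvGfun t c)
    (hkeysl : l2n.keys = PySem.Set.ofList (t.map (fun p => pvLabel p.2))) :
    (l2n.keys.foldl (fun tt label =>
        let node_names := l2n.getD label []
        if 1 < node_names.length then
          (PySem.List.pyRange 0 (node_names.length : Int) 1).foldl (fun tt i =>
            tt.modify (PySem.List.pyGetD node_names i "") []
              (fun inner => ((PySem.Dict.mk inner).insert "label"
                  (pvLabel inner ++ PySem.Int.toStr (i + 1))).items)) tt
        else tt) (PySem.Dict.mk t)).items
      = pvMap (t.map (fun p => pvLabel p.2)) [] t := by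
  have hkeys : (PySem.Dict.mk t).keys = t.map Prod.fst := rfl
  have hktnd : (PySem.Dict.mk t).keys.Nodup := by rw [hkeys]; exact hnd
  have hbody : (fun (tt : PySem.Dict String (List (String × String))) label =>
      let node_names := l2n.getD label []
      if 1 < node_names.length then
        (PySem.List.pyRange 0 (node_names.length : Int) 1).foldl (fun tt i =>
          tt.modify (PySem.List.pyGetD node_names i "") []
            (fun inner => ((PySem.Dict.mk inner).insert "label"
                (pvLabel inner ++ PySem.Int.toStr (i + 1))).items)) tt
      else tt) = pvOuterStep (pvGfun t) := by
    funext tt c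
    simp only [pvOuterStep, hgval]
  rw [hbody]
  have hsub : ∀ c, ∀ m ∈ pvGfun t c, m ∈ (PySem.Dict.mk t).keys := by
    intro c m hm
    obtain ⟨q, hq, hq1⟩ := List.mem_map.1 hm
    rw [hkeys, ← hq1]
    exact List.mem_map_of_mem (List.mem_of_mem_filter hq)
  have hkeys2 : (l2n.keys.foldl (pvOuterStep (pvGfun t)) (PySem.Dict.mk t)).keys
      = (PySem.Dict.mk t).keys :=
    pv_outer_keys _ _ _ (fun c _ => hsub c)
  rw [PySem.Dict.items_eq_map_keys _ (by rw [hkeys2]; exact hktnd) [], hkeys2, hkeys,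
    List.map_map]
  have hmain : ∀ p ∈ t,
      ((fun k => (k, (l2n.keys.foldl (pvOuterStep (pvGfun t)) (PySem.Dict.mk t)).getD k [])) ∘ Prod.fst) p
        = (p.1, if 1 < (t.map (fun q => pvLabel q.2)).count (pvLabel p.2)
            then pvF (((pvGfun t (pvLabel p.2)).idxOf p.1 : Int)) p.2
            else p.2) := by
    intro p hp
    have hng : ∀ c, p.1 ∈ pvGfun t c → c = pvLabel p.2 := by
      intro c hc
      obtain ⟨q, hq, hq1⟩ := List.mem_map.1 hc
      have hqf := List.mem_filter.1 hq
      have : q = p := pv_key_inj hnd hqf.1 hp hq1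
      subst this
      exact (beq_iff_eq.1 hqf.2).symm
    have hgnd : (pvGfun t (pvLabel p.2)).Nodup := by
      have hsubl : List.Sublist (pvGfun t (pvLabel p.2)) (t.map (fun q => q.1)) :=
        List.Sublist.map _ List.filter_sublist
      exact List.Nodup.sublist hsubl hnd
    have hmem : p.1 ∈ pvGfun t (pvLabel p.2) :=
      List.mem_map_of_mem (List.mem_filter.2 ⟨hp, by simp⟩)
    have hcsnd : l2n.keys.Nodup := by rw [hkeysl]; exact PySem.Set.nodup_ofList _
    have := pv_outer_main (pvGfun t) (pvLabel p.2) p.1 hng hgnd hmem l2n.keys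
      (PySem.Dict.mk t) hcsnd
    simp only [Function.comp_apply]
    rw [this]
    have hgetD : (PySem.Dict.mk t).getD p.1 [] = p.2 :=
      PySem.Dict.getD_of_mem_items _ (by exact hp) hktnd []
    rw [hgetD]
    have hlen : (pvGfun t (pvLabel p.2)).length
        = (t.map (fun q => pvLabel q.2)).count (pvLabel p.2) := by
      unfold pvGfun
      rw [List.length_map, List.count_eq_countP, List.countP_map,
        List.countP_eq_length_filter]
      rfl
    have hiff : (pvLabel p.2 ∈ l2n.keys ∧ 1 < (pvGfun t (pvLabel p.2)).length)
        ↔ 1 < (t.map (fun q => pvLabel q.2)).count (pvLabel p.2) := by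
      rw [hlen, hkeysl, PySem.Set.mem_ofList]
      constructor
      · exact fun h => h.2
      · intro h
        exact ⟨List.count_pos_iff.1 (by omega), h⟩
    rw [if_congr hiff rfl rfl]
  rw [List.map_congr_left hmain]
  exact pvA_assemble t hnd t [] rfl

lemma pvA_phase1 (t : List (String × List (String × String)))
    (hnd : (t.map Prod.fst).Nodup) :
    (∀ c, ((PySem.Dict.mk t).keys.foldl (fun d node_name =>
        d.modify (pvLabel ((PySem.Dict.mk t).getD node_name [])) [] (fun l => l ++ [node_name]))
        PySem.Dict.empty).getD c [] = pvGfun t c)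
    ∧ ((PySem.Dict.mk t).keys.foldl (fun d node_name =>
        d.modify (pvLabel ((PySem.Dict.mk t).getD node_name [])) [] (fun l => l ++ [node_name]))
        PySem.Dict.empty).keys = PySem.Set.ofList (t.map (fun p => pvLabel p.2)) := by
  have hkeys : (PySem.Dict.mk t).keys = t.map Prod.fst := rfl
  have hktnd : (PySem.Dict.mk t).keys.Nodup := by rw [hkeys]; exact hnd
  have hq : (PySem.Dict.mk t).keys.map (fun n => (pvLabel ((PySem.Dict.mk t).getD n []), n))
      = t.map (fun p => (pvLabel p.2, p.1)) := by
    rw [hkeys, List.map_map]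
    refine List.map_congr_left (fun p hp => ?_)
    have : (PySem.Dict.mk t).getD p.1 [] = p.2 :=
      PySem.Dict.getD_of_mem_items _ (by exact hp) hktnd []
    simp [this]
  have hl2n : ((PySem.Dict.mk t).keys.foldl (fun d node_name =>
        d.modify (pvLabel ((PySem.Dict.mk t).getD node_name [])) [] (fun l => l ++ [node_name]))
        PySem.Dict.empty)
      = (t.map (fun p => (pvLabel p.2, p.1))).foldl
          (fun d pr => d.modify pr.1 [] (fun l => l ++ [pr.2])) PySem.Dict.empty := by
    rw [← hq, List.foldl_map]
  constructor
  · intro c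
    rw [hl2n, PySem.Dict.getD_foldl_modify_append]
    rw [List.filter_map, List.map_map]
    simp only [PySem.Dict.getD_empty, List.nil_append]
    rfl
  · rw [hl2n, PySem.Dict.keys_foldl_modify_key _ Prod.fst [] (fun d pr => fun l => l ++ [pr.2])]
    rw [List.map_map]
    rw [show (PySem.Dict.empty : PySem.Dict String (List String)).keys = ([] : List String) from rfl]
    rw [show PySem.Set.update ([] : List String) (t.map (Prod.fst ∘ fun p => (pvLabel p.2, p.1)))
        = PySem.Set.ofList (t.map (Prod.fst ∘ fun p => (pvLabel p.2, p.1))) from PySem.Set.update_empty _]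
    rfl

lemma pvA_eq (t : List (String × List (String × String)))
    (hnd : (t.map Prod.fst).Nodup) :
    handle_same_labels t = pvMap (t.map (fun p => pvLabel p.2)) [] t := by
  have h1 := pvA_phase1 t hnd
  exact pvA_phase2 t hnd _ h1.1 h1.2

-- ===== VERDICT (by name: the statement is the Claim_ definition above) =====
theorem handle_same_labels_spec : Claim_equal_handle_same_labels := by
  intro t _ hpre
  unfold Spec_handle_same_labels
  rw [pvB_eq, pvA_eq t hpre.1]
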